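-- pv_equiv track=rewrite | github.com/danman60/WolfPack | intel/wolfpack/modules/lp_pool_scanner.py | _classify_il_risk
-- ===== SOURCE A (Python) =====
-- def _classify_il_risk(name: str) -> str:
--     """Classify IL risk based on token pair."""
--     stables = {"USDC", "USDT", "DAI", "FRAX", "LUSD", "TUSD", "BUSD", "GUSD", "USDP"}
--     majors = {"WETH", "ETH", "WBTC", "BTC"}
--
--     name_upper = name.upper()
--     tokens = [t.strip().split()[0] for t in name_upper.split("/")]
--
--     if all(t in stables for t in tokens):
--         return "low"
--     if all(t in (stables | majors) for t in tokens):
--         return "medium"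
--     return "high"
-- ===== SOURCE B (Python) =====
-- def _classify_il_risk(name: str) -> str:
--     """Classify IL risk based on token pair."""
--     stables = {"USDC", "USDT", "DAI", "FRAX", "LUSD", "TUSD", "BUSD", "GUSD", "USDP"}
--     majors = {"WETH", "ETH", "WBTC", "BTC"}
--
--     worst = 0
--     for part in name.upper().split("/"):
--         t = part.strip().split()[0]
--         worst = max(worst, 0 if t in stables else 1 if t in majors else 2)
--     return "low" if worst == 0 else "medium" if worst == 1 else "high"
-- ===== Notes on version B (the rewrite author's own statement) =====
-- stated objective: alternative
-- what changed: Replaces the two separate all()-membership scans over the token list with a single fold that keeps the worst tier (stable=0, major=1, other=2) and maps the maximum tier to low/medium/high.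
import Mathlib
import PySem

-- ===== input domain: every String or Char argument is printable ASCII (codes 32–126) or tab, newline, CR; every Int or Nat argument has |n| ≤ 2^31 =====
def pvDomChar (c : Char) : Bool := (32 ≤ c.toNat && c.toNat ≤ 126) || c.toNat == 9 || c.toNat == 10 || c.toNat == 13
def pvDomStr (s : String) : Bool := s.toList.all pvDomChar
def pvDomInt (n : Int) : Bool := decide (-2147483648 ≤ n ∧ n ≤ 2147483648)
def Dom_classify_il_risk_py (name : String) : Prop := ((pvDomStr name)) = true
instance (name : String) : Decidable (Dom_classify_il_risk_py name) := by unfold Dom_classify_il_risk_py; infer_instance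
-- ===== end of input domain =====

-- B: one fold keeping the worst tier (stable=0, major=1, other=2) instead of A's two all()-membership scans; same parsing, same values.

-- ===== PORT A =====
def pvStables : List String :=
  ["USDC", "USDT", "DAI", "FRAX", "LUSD", "TUSD", "BUSD", "GUSD", "USDP"]
def pvMajors : List String := ["WETH", "ETH", "WBTC", "BTC"]

-- first whitespace word of the stripped part; the index-0 access raises IndexError when the part is whitespace-only — Pre_ excludes that.
def pvFirstWord (t : String) : String :=
  PySem.List.pyGetD (PySem.Str.split₀ (PySem.Str.strip t)) 0 ""

def classify_il_risk_py (name : String) : String :=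
  let name_upper := PySem.Str.upper name
  let tokens := ((PySem.Str.split? name_upper "/").getD []).map pvFirstWord
  if tokens.all (fun t => pvStables.contains t) then "low"
  else if tokens.all (fun t => (pvStables ++ pvMajors).contains t) then "medium"
  else "high"

-- ===== PORT B =====
def pvTier (t : String) : Nat :=
  if pvStables.contains t then 0 else if pvMajors.contains t then 1 else 2

def classify_il_risk_py_alt (name : String) : String :=
  let worst :=
    ((PySem.Str.split? (PySem.Str.upper name) "/").getD []).foldl
      (fun worst part => max worst (pvTier (pvFirstWord part))) 0
  if worst = 0 then "low" else if worst = 1 then "medium" else "high"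

-- ===== PRECONDITION & SPEC =====
-- Pre_ excludes inputs where some slash-separated part is empty or whitespace-only: there the
-- first-word indexing raises IndexError in both A and B.
def Pre_classify_il_risk_py (name : String) : Prop :=
  ∀ t ∈ (PySem.Str.split? (PySem.Str.upper name) "/").getD [],
    PySem.Str.split₀ (PySem.Str.strip t) ≠ []
instance (name : String) : Decidable (Pre_classify_il_risk_py name) := by
  unfold Pre_classify_il_risk_py; infer_instance
def pvWitness_classify_il_risk_py : String := "USDC/ETH"

def Spec_classify_il_risk_py (name : String) (out : String) : Prop := out = classify_il_risk_py_alt name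
instance (name : String) (out : String) : Decidable (Spec_classify_il_risk_py name out) := by unfold Spec_classify_il_risk_py; infer_instance

-- ===== CLAIM (what is proved, stated in full; the proofs are below) =====
def Claim_equal_classify_il_risk_py : Prop := ∀ (name : String), Dom_classify_il_risk_py name → Pre_classify_il_risk_py name → Spec_classify_il_risk_py name (classify_il_risk_py name)

-- ===== LEMMAS AND PROOFS =====

-- the fold's result is ≤ n iff the accumulator is and every part's token tier is
theorem pv_foldl_max_le (ps : List String) (a n : Nat) :
    (ps.foldl (fun w p => max w (pvTier (pvFirstWord p))) a ≤ n) ↔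
      (a ≤ n ∧ ∀ p ∈ ps, pvTier (pvFirstWord p) ≤ n) := by
  induction ps generalizing a with
  | nil => simp
  | cons x xs ih =>
    simp only [List.foldl_cons, ih, List.mem_cons, max_le_iff]
    constructor
    · rintro ⟨⟨h1, h2⟩, h3⟩
      exact ⟨h1, fun p hp => hp.elim (fun e => e ▸ h2) (h3 p)⟩
    · rintro ⟨h1, h2⟩
      exact ⟨⟨h1, h2 x (Or.inl rfl)⟩, fun p hp => h2 p (Or.inr hp)⟩

theorem pv_tier_eq_zero (t : String) : pvTier t = 0 ↔ pvStables.contains t = true := by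
  unfold pvTier; split_ifs with h1 h2 <;> simp_all

theorem pv_tier_le_one (t : String) : pvTier t ≤ 1 ↔ (pvStables ++ pvMajors).contains t = true := by
  unfold pvTier; split_ifs with h1 h2 <;> simp_all

theorem pv_tier_le_two (t : String) : pvTier t ≤ 2 := by
  unfold pvTier; split_ifs <;> omega

-- A's two all()-scans and B's worst-tier fold agree on any parts list
theorem pv_key (ps : List String) :
    (if (ps.map pvFirstWord).all (fun t => pvStables.contains t) then "low"
     else if (ps.map pvFirstWord).all (fun t => (pvStables ++ pvMajors).contains t) then "medium"
     else "high")
    = (if ps.foldl (fun w p => max w (pvTier (pvFirstWord p))) 0 = 0 then "low"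
       else if ps.foldl (fun w p => max w (pvTier (pvFirstWord p))) 0 = 1 then "medium"
       else "high") := by
  have hle2 : ps.foldl (fun w p => max w (pvTier (pvFirstWord p))) 0 ≤ 2 :=
    (pv_foldl_max_le ps 0 2).mpr ⟨by omega, fun p _ => pv_tier_le_two _⟩
  have h0 : ps.foldl (fun w p => max w (pvTier (pvFirstWord p))) 0 = 0 ↔
      ((ps.map pvFirstWord).all (fun t => pvStables.contains t)) = true := by
    rw [← Nat.le_zero, pv_foldl_max_le]
    simp only [List.all_eq_true, List.mem_map, Nat.le_zero, pv_tier_eq_zero]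
    constructor
    · rintro ⟨-, h⟩ t ⟨p, hp, rfl⟩; exact h p hp
    · intro h; exact ⟨trivial, fun p hp => h _ ⟨p, hp, rfl⟩⟩
  have h1 : ps.foldl (fun w p => max w (pvTier (pvFirstWord p))) 0 ≤ 1 ↔
      ((ps.map pvFirstWord).all (fun t => (pvStables ++ pvMajors).contains t)) = true := by
    rw [pv_foldl_max_le]
    simp only [List.all_eq_true, List.mem_map, pv_tier_le_one]
    constructor
    · rintro ⟨-, h⟩ t ⟨p, hp, rfl⟩; exact h p hp
    · intro h; exact ⟨by omega, fun p hp => h _ ⟨p, hp, rfl⟩⟩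
  by_cases hA : ((ps.map pvFirstWord).all (fun t => pvStables.contains t)) = true
  · rw [if_pos hA, if_pos (h0.mpr hA)]
  · have hne0 : ps.foldl (fun w p => max w (pvTier (pvFirstWord p))) 0 ≠ 0 :=
      fun e => hA (h0.mp e)
    by_cases hB : ((ps.map pvFirstWord).all (fun t => (pvStables ++ pvMajors).contains t)) = true
    · have hle1 := h1.mpr hB
      rw [if_neg hA, if_pos hB, if_neg hne0, if_pos (by omega)]
    · have hgt1 : ¬ ps.foldl (fun w p => max w (pvTier (pvFirstWord p))) 0 ≤ 1 :=
        fun h => hB (h1.mp h)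
      rw [if_neg hA, if_neg hB, if_neg hne0, if_neg (by omega)]

-- ===== VERDICT (by name: the statement is the Claim_ definition above) =====
theorem classify_il_risk_py_spec : Claim_equal_classify_il_risk_py := by
  intro name _ _
  unfold Spec_classify_il_risk_py classify_il_risk_py classify_il_risk_py_alt
  exact pv_key ((PySem.Str.split? (PySem.Str.upper name) "/").getD [])
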